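-- pv_equiv track=rewrite | github.com/rrmalmstrom/capsule-single-cell-sort-scripts | generate_barcode_labels.py | validate_custom_base_barcode
-- ===== SOURCE A (Python) =====
-- CHARSET = "ABCDEFGHIJKLMNOPQRSTUVWXYZ0123456789"
--
-- def validate_custom_base_barcode(base_barcode):
--     """
--     Validate that a custom base barcode follows the expected format.
--
--     Args:
--         base_barcode (str): The custom base barcode to validate
--
--     Returns:
--         bool: True if valid, False otherwise
--
--     Validation rules:
--     - Must be exactly 5 characters long
--     - First character must be a letter (A-Z)
--     - All characters must be uppercase letters or digits
--     - All characters must be from the allowed CHARSET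
--     """
--     if not base_barcode:
--         return False
--
--     # Check length
--     if len(base_barcode) != 5:
--         return False
--
--     # Check first character is a letter
--     if not base_barcode[0].isalpha():
--         return False
--
--     # Check all characters are uppercase and from allowed charset
--     if base_barcode != base_barcode.upper():
--         return False
--
--     # Check all characters are in the allowed charset
--     for char in base_barcode:
--         if char not in CHARSET:
--             return False
--
--     return True
-- ===== SOURCE B (Python) =====
-- def validate_custom_base_barcode(base_barcode):
--     """Validate a 5-char barcode by running a tiny recursive acceptor (a DFA with a
--     countdown): the first consumed char (countdown == 5) must be A-Z, later chars may
--     also be digits, and acceptance requires the countdown to reach exactly 0 at the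
--     end of the string. Length, first-char and charset checks are all fused into the
--     one recursion; there is no len(), upper() or charset constant."""
--     if not base_barcode:
--         return False
--
--     def ok(chars, k):
--         if not chars:
--             return k == 0
--         if k == 0:
--             return False
--         c = chars[0]
--         allowed = 'A' <= c <= 'Z' or (k < 5 and '0' <= c <= '9')
--         return allowed and ok(chars[1:], k - 1)
--
--     return ok(list(base_barcode), 5)
-- ===== Notes on version B (the rewrite author's own statement) =====
-- stated objective: alternative
-- what changed: Replaces A's staged passes (length check, isalpha on the head, a whole-string upper() comparison, and a per-character scan of the CHARSET constant) with one recursive acceptor that consumes the string with a countdown from 5, allowing A-Z always and digits only after the first char, and accepting iff the countdown hits 0 exactly at the end; length, first-char and charset checks are fused into the single recursion and the CHARSET constant and upper() pass disappear.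
import Mathlib
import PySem

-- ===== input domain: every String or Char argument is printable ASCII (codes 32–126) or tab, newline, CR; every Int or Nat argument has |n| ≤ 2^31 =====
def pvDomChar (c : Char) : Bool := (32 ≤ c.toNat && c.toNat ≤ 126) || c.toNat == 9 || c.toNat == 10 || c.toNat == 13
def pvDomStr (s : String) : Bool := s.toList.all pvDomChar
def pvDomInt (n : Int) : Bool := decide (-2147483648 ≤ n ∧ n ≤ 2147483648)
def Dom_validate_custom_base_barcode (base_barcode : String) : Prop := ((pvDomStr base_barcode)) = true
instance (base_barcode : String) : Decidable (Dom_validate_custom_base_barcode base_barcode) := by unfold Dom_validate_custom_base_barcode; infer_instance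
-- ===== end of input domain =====

-- B replaces A's staged passes (length, isalpha head, upper() comparison, CHARSET scan)
-- with one recursive countdown acceptor over the characters (objective: alternative).

-- ===== PORT A =====
def CHARSET : List Char := "ABCDEFGHIJKLMNOPQRSTUVWXYZ0123456789".toList

def validate_custom_base_barcode (base_barcode : String) : Bool :=
  let cs := base_barcode.toList
  if cs = [] then false                                   -- if not base_barcode: return False
  else if cs.length ≠ 5 then false                        -- if len(base_barcode) != 5: return False
  -- base_barcode[0].isalpha(): guarded non-empty above, so headD is exact here
  else if ¬ (PySem.Chars.isalpha (cs.headD ' ') = true) then false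
  else if cs ≠ PySem.Chars.upper cs then false            -- if base_barcode != base_barcode.upper()
  -- for char in base_barcode: if char not in CHARSET: return False  /  return True
  else cs.all (fun c => PySem.Chars.isIn [c] CHARSET)

-- ===== PORT B =====
-- the recursive acceptor 'ok(chars, k)' from Source B, step for step
def pvOkB : List Char → Nat → Bool
  | [], k => k == 0
  | _ :: _, 0 => false
  | c :: rest, Nat.succ k' =>
    ((decide ('A' ≤ c) && decide (c ≤ 'Z')) ||
     (decide (k' + 1 < 5) && (decide ('0' ≤ c) && decide (c ≤ '9')))) &&
    pvOkB rest k'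

def validate_custom_base_barcode_alt (base_barcode : String) : Bool :=
  if base_barcode.toList = [] then false                  -- if not base_barcode: return False
  else pvOkB base_barcode.toList 5                        -- return ok(list(base_barcode), 5)

-- ===== PRECONDITION & SPEC =====
def Spec_validate_custom_base_barcode (base_barcode : String) (out : Bool) : Prop := out = validate_custom_base_barcode_alt base_barcode
instance (base_barcode : String) (out : Bool) : Decidable (Spec_validate_custom_base_barcode base_barcode out) := by unfold Spec_validate_custom_base_barcode; infer_instance

-- ===== CLAIM (what is proved, stated in full; the proofs are below) =====
def Claim_equal_validate_custom_base_barcode : Prop := ∀ (base_barcode : String), Dom_validate_custom_base_barcode base_barcode → Spec_validate_custom_base_barcode base_barcode (validate_custom_base_barcode base_barcode)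

-- ===== LEMMAS AND PROOFS =====
lemma le_char_iff (a c : Char) : (a ≤ c) ↔ (a.toNat ≤ c.toNat) := by
  rw [Char.le_def, UInt32.le_iff_toNat_le]; rfl

lemma inCS_iff (c : Char) : PySem.Chars.isIn [c] CHARSET = true ↔
    (65 ≤ c.toNat ∧ c.toNat ≤ 90) ∨ (48 ≤ c.toNat ∧ c.toNat ≤ 57) := by
  rw [PySem.Chars.isIn_iff_infix, List.singleton_infix_iff]
  constructor
  · intro hm
    have hall : CHARSET.all (fun x => decide ((65 ≤ x.toNat ∧ x.toNat ≤ 90) ∨ (48 ≤ x.toNat ∧ x.toNat ≤ 57))) = true := by decide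
    simpa using List.all_eq_true.mp hall c hm
  · intro h
    have hc : c = Char.ofNat c.toNat := (Char.ofNat_toNat c).symm
    rcases h with ⟨h1, h2⟩ | ⟨h1, h2⟩ <;>
    · set n := c.toNat with hn
      interval_cases n <;> (rw [hc]; decide)

lemma isalpha_iff (c : Char) : PySem.Chars.isalpha c = true ↔
    (65 ≤ c.toNat ∧ c.toNat ≤ 90) ∨ (97 ≤ c.toNat ∧ c.toNat ≤ 122) := by
  simp [PySem.Chars.isalpha, PySem.Chars.isupper, PySem.Chars.islower,
        le_char_iff, show ('A':Char).toNat = 65 from rfl, show ('Z':Char).toNat = 90 from rfl,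
        show ('a':Char).toNat = 97 from rfl, show ('z':Char).toNat = 122 from rfl]

lemma toNat_ofNat_lt (n : Nat) (h : n < 55296) : (Char.ofNat n).toNat = n := by
  simp [Char.ofNat, Char.toNat, Char.ofNatAux, h, Nat.isValidChar]

lemma islower_iff (c : Char) : PySem.Chars.islower c = true ↔ (97 ≤ c.toNat ∧ c.toNat ≤ 122) := by
  simp [PySem.Chars.islower, le_char_iff,
    show ('a':Char).toNat = 97 from rfl, show ('z':Char).toNat = 122 from rfl]

lemma upperChar_eq_self_iff (c : Char) :
    PySem.Chars.upperChar c = c ↔ ¬ (97 ≤ c.toNat ∧ c.toNat ≤ 122) := by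
  by_cases h : 97 ≤ c.toNat ∧ c.toNat ≤ 122
  · refine iff_of_false ?_ (by simpa using h)
    rw [PySem.Chars.upperChar, if_pos ((islower_iff c).mpr h)]
    intro heq
    have : (Char.ofNat (c.toNat - 32)).toNat = c.toNat := congrArg Char.toNat heq
    rw [toNat_ofNat_lt _ (by omega)] at this
    omega
  · refine iff_of_true ?_ h
    rw [PySem.Chars.upperChar, if_neg (by rw [islower_iff]; exact h)]

lemma pvOkB_length {cs : List Char} {k : Nat} (h : pvOkB cs k = true) : cs.length = k := by
  induction cs generalizing k with
  | nil => cases k with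
    | zero => rfl
    | succ k' => simp [pvOkB] at h
  | cons c rest ih =>
    cases k with
    | zero => simp [pvOkB] at h
    | succ k' =>
      simp only [pvOkB, Bool.and_eq_true] at h
      simp [ih h.2]

lemma pvOkB5_iff (a b c d e : Char) : pvOkB [a, b, c, d, e] 5 = true ↔
    (65 ≤ a.toNat ∧ a.toNat ≤ 90) ∧
    ((65 ≤ b.toNat ∧ b.toNat ≤ 90) ∨ (48 ≤ b.toNat ∧ b.toNat ≤ 57)) ∧
    ((65 ≤ c.toNat ∧ c.toNat ≤ 90) ∨ (48 ≤ c.toNat ∧ c.toNat ≤ 57)) ∧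
    ((65 ≤ d.toNat ∧ d.toNat ≤ 90) ∨ (48 ≤ d.toNat ∧ d.toNat ≤ 57)) ∧
    ((65 ≤ e.toNat ∧ e.toNat ≤ 90) ∨ (48 ≤ e.toNat ∧ e.toNat ≤ 57)) := by
  show pvOkB [a, b, c, d, e] (Nat.succ 4) = true ↔ _
  simp only [pvOkB, Bool.and_eq_true, Bool.or_eq_true, decide_eq_true_eq, le_char_iff,
    show ('A' : Char).toNat = 65 from rfl, show ('Z' : Char).toNat = 90 from rfl,
    show ('0' : Char).toNat = 48 from rfl, show ('9' : Char).toNat = 57 from rfl]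
  constructor
  · rintro ⟨h1, h2, h3, h4, h5, -⟩
    refine ⟨?_, ?_, ?_, ?_, ?_⟩ <;> omega
  · rintro ⟨h1, h2, h3, h4, h5⟩
    refine ⟨by omega, by omega, by omega, by omega, by omega, rfl⟩

lemma upper5_iff (a b c d e : Char) :
    [a, b, c, d, e] = PySem.Chars.upper [a, b, c, d, e] ↔
    (¬ (97 ≤ a.toNat ∧ a.toNat ≤ 122)) ∧ (¬ (97 ≤ b.toNat ∧ b.toNat ≤ 122)) ∧
    (¬ (97 ≤ c.toNat ∧ c.toNat ≤ 122)) ∧ (¬ (97 ≤ d.toNat ∧ d.toNat ≤ 122)) ∧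
    (¬ (97 ≤ e.toNat ∧ e.toNat ≤ 122)) := by
  have hx : ∀ x : Char, (x = PySem.Chars.upperChar x) ↔ ¬ (97 ≤ x.toNat ∧ x.toNat ≤ 122) :=
    fun x => eq_comm.trans (upperChar_eq_self_iff x)
  simp only [PySem.Chars.upper, List.map_cons, List.map_nil, List.cons.injEq, and_true]
  rw [hx, hx, hx, hx, hx]

-- ===== VERDICT (by name: the statement is the Claim_ definition above) =====
theorem validate_custom_base_barcode_spec : Claim_equal_validate_custom_base_barcode := by
  intro s _
  unfold Spec_validate_custom_base_barcode validate_custom_base_barcode validate_custom_base_barcode_alt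
  by_cases hnil : s.toList = []
  · simp [hnil]
  rw [if_neg hnil, if_neg hnil]
  by_cases hlen : s.toList.length = 5
  swap
  · rw [if_pos hlen]
    cases hb : pvOkB s.toList 5 with
    | false => rfl
    | true => exact absurd (pvOkB_length hb) hlen
  obtain ⟨a, b, c, d, e, hcs⟩ : ∃ a b c d e, s.toList = [a, b, c, d, e] := by
    match h : s.toList, hlen with
    | [a, b, c, d, e], _ => exact ⟨a, b, c, d, e, rfl⟩
  rw [hcs]
  rw [if_neg (by simp)]
  by_cases halpha : PySem.Chars.isalpha ([a, b, c, d, e].headD ' ') = true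
  swap
  · rw [if_pos halpha]
    cases hb : pvOkB [a, b, c, d, e] 5 with
    | false => rfl
    | true =>
      exfalso
      apply halpha
      have := (pvOkB5_iff a b c d e).mp hb
      simp only [List.headD_cons]
      rw [isalpha_iff]
      exact Or.inl this.1
  rw [if_neg (not_not_intro halpha)]
  by_cases hupper : [a, b, c, d, e] = PySem.Chars.upper [a, b, c, d, e]
  swap
  · rw [if_pos hupper]
    cases hb : pvOkB [a, b, c, d, e] 5 with
    | false => rfl
    | true =>
      exfalso
      apply hupper
      have h5 := (pvOkB5_iff a b c d e).mp hb
      rw [upper5_iff]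
      refine ⟨by omega, by omega, by omega, by omega, by omega⟩
  rw [if_neg (not_not_intro hupper)]
  rw [Bool.eq_iff_iff, pvOkB5_iff]
  simp only [List.headD_cons] at halpha
  rw [isalpha_iff] at halpha
  rw [upper5_iff] at hupper
  simp only [List.all_cons, List.all_nil, Bool.and_true, Bool.and_eq_true, inCS_iff]
  constructor
  · rintro ⟨h1, h2, h3, h4, h5⟩
    exact ⟨by omega, h2, h3, h4, h5⟩
  · rintro ⟨h1, h2, h3, h4, h5⟩
    exact ⟨Or.inl h1, h2, h3, h4, h5⟩
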